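-- pv_equiv track=rewrite | github.com/yuanguangshan/hermes-agent | agent/think_scrubber.py | _find_first_tag
-- ===== SOURCE A (Python) =====
-- from typing import Tuple
--
-- def _find_first_tag(
--     buf: str, tags: Tuple[str, ...],
-- ) -> Tuple[int, int]:
--     """Return (earliest_index, tag_length) over *tags*, or (-1, 0).
--
--     Case-insensitive match.
--     """
--     buf_lower = buf.lower()
--     best_idx = -1
--     best_len = 0
--     for tag in tags:
--         idx = buf_lower.find(tag.lower())
--         if idx != -1 and (best_idx == -1 or idx < best_idx):
--             best_idx = idx
--             best_len = len(tag)
--     return best_idx, best_len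
-- ===== SOURCE B (Python) =====
-- from typing import Tuple
--
-- def _find_first_tag(
--     buf: str, tags: Tuple[str, ...],
-- ) -> Tuple[int, int]:
--     """Return (earliest_index, tag_length) over *tags*, or (-1, 0).
--
--     Case-insensitive match.  Position-major scan: walk the buffer left to
--     right and stop at the first position where any tag matches; ties at the
--     same position go to the earliest tag in *tags*.
--     """
--     bl = buf.lower()
--     lowered = [t.lower() for t in tags]
--     for i in range(len(bl) + 1):
--         for t, lt in zip(tags, lowered):
--             if bl.startswith(lt, i):
--                 return i, len(t)
--     return -1, 0
-- ===== Notes on version B (the rewrite author's own statement) =====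
-- stated objective: faster
-- what changed: B does a position-major scan with early exit (return at the first buffer position where any tag matches, first matching tag wins) instead of A's tag-major pass that runs a full find() for every tag and folds a running minimum.
import Mathlib
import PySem

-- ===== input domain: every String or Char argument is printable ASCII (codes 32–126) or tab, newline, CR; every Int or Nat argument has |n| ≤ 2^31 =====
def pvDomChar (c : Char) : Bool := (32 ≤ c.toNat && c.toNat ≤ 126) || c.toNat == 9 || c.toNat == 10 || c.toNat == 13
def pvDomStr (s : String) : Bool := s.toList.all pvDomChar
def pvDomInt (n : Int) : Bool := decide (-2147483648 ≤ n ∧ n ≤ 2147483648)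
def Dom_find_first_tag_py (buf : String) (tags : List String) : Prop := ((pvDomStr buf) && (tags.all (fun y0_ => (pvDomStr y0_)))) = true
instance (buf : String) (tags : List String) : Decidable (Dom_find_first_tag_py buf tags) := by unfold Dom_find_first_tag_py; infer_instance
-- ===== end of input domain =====

-- B replaces A's tag-major pass (each tag's find(), folding a running minimum) with a
-- position-major scan of the buffer that returns at the first position where any tag matches.


-- ===== PORT A =====
def find_first_tag_py (buf : String) (tags : List String) : Int × Int :=
  let buf_lower := PySem.Str.lower buf
  tags.foldl
    (fun (b : Int × Int) (tag : String) =>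
      let idx := PySem.Str.find buf_lower (PySem.Str.lower tag)
      if idx ≠ -1 ∧ (b.1 = -1 ∨ idx < b.1) then (idx, PySem.Str.len tag) else b)
    (-1, 0)

-- ===== PORT B =====
-- inner loop of B: first tag (in tuple order) matching at position i.
-- Python's bl.startswith(lt, i) with 0 ≤ i ≤ len(bl) is exactly "lt is a prefix of bl[i:]".
def pvInner (bl : List Char) (i : Nat) : List (String × List Char) → Option (Int × Int)
  | [] => none
  | (t, lt) :: rest =>
    if PySem.Chars.startswith (bl.drop i) lt then some ((i : Int), PySem.Str.len t)
    else pvInner bl i rest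

-- outer loop of B: first position (from the given index list) with a match.
def pvScan (bl : List Char) (pairs : List (String × List Char)) : List Nat → Int × Int
  | [] => (-1, 0)
  | i :: is =>
    match pvInner bl i pairs with
    | some r => r
    | none => pvScan bl pairs is

def find_first_tag_py_alt (buf : String) (tags : List String) : Int × Int :=
  let bl := (PySem.Str.lower buf).toList
  let pairs := tags.map (fun t => (t, (PySem.Str.lower t).toList))
  pvScan bl pairs (List.range (bl.length + 1))

-- ===== PRECONDITION & SPEC =====
def Spec_find_first_tag_py (buf : String) (tags : List String) (out : Int × Int) : Prop := out = find_first_tag_py_alt buf tags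
instance (buf : String) (tags : List String) (out : Int × Int) : Decidable (Spec_find_first_tag_py buf tags out) := by unfold Spec_find_first_tag_py; infer_instance

-- ===== CLAIM (what is proved, stated in full; the proofs are below) =====
def Claim_equal_find_first_tag_py : Prop := ∀ (buf : String) (tags : List String), Dom_find_first_tag_py buf tags → Spec_find_first_tag_py buf tags (find_first_tag_py buf tags)

-- ===== LEMMAS AND PROOFS =====

-- A's loop body as a binary combiner on (best_idx, best_len) candidates.
def pvG (b c : Int × Int) : Int × Int :=
  if c.1 ≠ -1 ∧ (b.1 = -1 ∨ c.1 < b.1) then c else b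

-- reference value: first candidate with minimal non-(-1) first component, else (-1, 0).
def pvSpecOf : List (Int × Int) → Int × Int
  | [] => (-1, 0)
  | c :: cs =>
    let r := pvSpecOf cs
    if c.1 ≠ -1 ∧ (r.1 = -1 ∨ c.1 ≤ r.1) then c else r

theorem pvSpecOf_cases (cands : List (Int × Int)) :
    pvSpecOf cands = (-1, 0) ∨ (pvSpecOf cands ∈ cands ∧ (pvSpecOf cands).1 ≠ -1) := by
  induction cands with
  | nil => left; rfl
  | cons c cs ih =>
    simp only [pvSpecOf]
    split_ifs with h
    · right; exact ⟨List.mem_cons_self, h.1⟩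
    · rcases ih with h1 | h1
      · left; exact h1
      · right; exact ⟨List.mem_cons_of_mem _ h1.1, h1.2⟩

theorem pvSpecOf_min (cands : List (Int × Int)) :
    ∀ c ∈ cands, c.1 ≠ -1 → (pvSpecOf cands).1 ≠ -1 ∧ (pvSpecOf cands).1 ≤ c.1 := by
  induction cands with
  | nil => intro c hc; simp at hc
  | cons d cs ih =>
    intro c hc hne
    simp only [pvSpecOf]
    rcases List.mem_cons.mp hc with rfl | hc
    · split_ifs with h
      · exact ⟨hne, le_refl _⟩
      · rcases not_and_or.mp h with h1 | h1
        · exact absurd (not_not.mp h1) hne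
        · push_neg at h1
          exact ⟨h1.1, le_of_lt h1.2⟩
    · have := ih c hc hne
      split_ifs with h
      · rcases h.2 with h2 | h2
        · exact absurd h2 this.1
        · exact ⟨h.1, le_trans h2 this.2⟩
      · exact this

theorem pvSpecOf_first (cands : List (Int × Int)) (h : (pvSpecOf cands).1 ≠ -1) :
    ∃ l1 l2, cands = l1 ++ pvSpecOf cands :: l2 ∧
      ∀ c ∈ l1, ¬(c.1 ≠ -1 ∧ c.1 ≤ (pvSpecOf cands).1) := by
  induction cands with
  | nil => simp [pvSpecOf] at h
  | cons c cs ih =>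
    simp only [pvSpecOf] at h ⊢
    split_ifs at h ⊢ with hc
    · exact ⟨[], cs, rfl, by simp⟩
    · obtain ⟨l1, l2, heq, hbad⟩ := ih h
      refine ⟨c :: l1, l2, by rw [List.cons_append]; exact congrArg (c :: ·) heq, ?_⟩
      intro d hd
      rcases List.mem_cons.mp hd with rfl | hd
      · intro hcontra
        exact hc ⟨hcontra.1, Or.inr hcontra.2⟩
      · exact hbad d hd

-- A's left fold with a running best equals comparing the accumulator with pvSpecOf.
theorem pv_foldl_g (cands : List (Int × Int)) :
    ∀ b : Int × Int, -1 ≤ b.1 → (∀ c ∈ cands, -1 ≤ c.1) →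
    List.foldl pvG b cands =
      (if (pvSpecOf cands).1 ≠ -1 ∧ (b.1 = -1 ∨ (pvSpecOf cands).1 < b.1)
       then pvSpecOf cands else b) := by
  induction cands with
  | nil => intro b hb hall; simp [pvSpecOf]
  | cons c cs ih =>
    intro b hb hall
    have hc : -1 ≤ c.1 := hall c List.mem_cons_self
    have hcs : ∀ d ∈ cs, -1 ≤ d.1 := fun d hd => hall d (List.mem_cons_of_mem _ hd)
    have hs : -1 ≤ (pvSpecOf cs).1 := by
      rcases pvSpecOf_cases cs with h | h
      · rw [h]
      · exact hcs _ h.1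
    simp only [List.foldl_cons, pvSpecOf]
    rw [ih (pvG b c) (by unfold pvG; split_ifs <;> omega) hcs]
    unfold pvG
    split_ifs <;> first | rfl | omega

theorem pvInner_none_iff (bl : List Char) (i : Nat) (pairs : List (String × List Char)) :
    pvInner bl i pairs = none ↔
      ∀ q ∈ pairs, PySem.Chars.startswith (bl.drop i) q.2 = false := by
  induction pairs with
  | nil => simp [pvInner]
  | cons q rest ih =>
    obtain ⟨t, lt⟩ := q
    simp only [pvInner]
    split_ifs with h
    · simp only [List.mem_cons]
      constructor
      · intro hcontra; exact absurd hcontra (by simp)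
      · intro hall
        have := hall (t, lt) (Or.inl rfl)
        simp [h] at this
    · rw [ih]
      constructor
      · intro hall q hq
        rcases List.mem_cons.mp hq with rfl | hq
        · simpa using h
        · exact hall q hq
      · intro hall q hq; exact hall q (List.mem_cons_of_mem _ hq)

theorem pvInner_first (bl : List Char) (i : Nat) (l1 l2 : List (String × List Char))
    (q : String × List Char)
    (h1 : ∀ q' ∈ l1, PySem.Chars.startswith (bl.drop i) q'.2 = false)
    (h2 : PySem.Chars.startswith (bl.drop i) q.2 = true) :
    pvInner bl i (l1 ++ q :: l2) = some ((i : Int), PySem.Str.len q.1) := by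
  induction l1 with
  | nil =>
    obtain ⟨t, lt⟩ := q
    simp only [List.nil_append, pvInner]
    simp only at h2
    rw [if_pos h2]
  | cons q' rest ih =>
    obtain ⟨t', lt'⟩ := q'
    simp only [List.cons_append, pvInner]
    have := h1 (t', lt') List.mem_cons_self
    simp only at this
    rw [if_neg (by simp [this])]
    exact ih (fun q hq => h1 q (List.mem_cons_of_mem _ hq))

theorem pvScan_none (bl : List Char) (pairs : List (String × List Char)) (is : List Nat)
    (h : ∀ i ∈ is, pvInner bl i pairs = none) : pvScan bl pairs is = (-1, 0) := by
  induction is with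
  | nil => rfl
  | cons i rest ih =>
    simp only [pvScan, h i List.mem_cons_self]
    exact ih (fun j hj => h j (List.mem_cons_of_mem _ hj))

theorem pvScan_split (bl : List Char) (pairs : List (String × List Char))
    (is1 is2 : List Nat) (i : Nat) (r : Int × Int)
    (h1 : ∀ j ∈ is1, pvInner bl j pairs = none)
    (h2 : pvInner bl i pairs = some r) :
    pvScan bl pairs (is1 ++ i :: is2) = r := by
  induction is1 with
  | nil => simp only [List.nil_append, pvScan, h2]
  | cons j rest ih =>
    simp only [List.cons_append, pvScan, h1 j List.mem_cons_self]
    exact ih (fun k hk => h1 k (List.mem_cons_of_mem _ hk))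

-- a match at position i forces the tag's find() to be ≥ 0 and ≤ i
theorem pv_match_find (bl lt : List Char) (i : Nat) (h : lt <+: bl.drop i) :
    0 ≤ PySem.Chars.find bl lt ∧ (PySem.Chars.find bl lt).toNat ≤ i := by
  have hinf : lt <:+: bl := h.isInfix.trans (List.drop_suffix i bl).isInfix
  have hpos : 0 ≤ PySem.Chars.find bl lt := (PySem.Chars.find_nonneg_iff bl lt).mpr hinf
  refine ⟨hpos, ?_⟩
  by_contra hgt
  push_neg at hgt
  exact (PySem.Chars.find_spec hpos).2 i hgt h

theorem pv_range_split (m n : Nat) (h : m ≤ n) :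
    ∃ t, List.range (n + 1) = List.range m ++ m :: t := by
  have : n + 1 = m + (n - m + 1) := by omega
  rw [this, List.range_add, List.range_succ_eq_map]
  exact ⟨List.map (fun x => m + x) (List.map Nat.succ (List.range (n - m))), by simp⟩

-- ===== VERDICT (by name: the statement is the Claim_ definition above) =====
theorem find_first_tag_py_spec : Claim_equal_find_first_tag_py := by
  intro buf tags _
  unfold Spec_find_first_tag_py
  show (tags.foldl
      (fun (b : Int × Int) (tag : String) =>
        let idx := PySem.Str.find (PySem.Str.lower buf) (PySem.Str.lower tag)
        if idx ≠ -1 ∧ (b.1 = -1 ∨ idx < b.1) then (idx, PySem.Str.len tag) else b)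
      (-1, 0)) =
    pvScan (PySem.Str.lower buf).toList (tags.map (fun t => (t, (PySem.Str.lower t).toList)))
      (List.range ((PySem.Str.lower buf).toList.length + 1))
  set bl := (PySem.Str.lower buf).toList with hbl
  set pairs := tags.map (fun t => (t, (PySem.Str.lower t).toList)) with hpairs
  set cands := pairs.map (fun q => (PySem.Chars.find bl q.2, PySem.Str.len q.1)) with hcands
  -- Step 1: A's fold is the fold of pvG over the candidate list
  have hA : (tags.foldl
      (fun (b : Int × Int) (tag : String) =>
        let idx := PySem.Str.find (PySem.Str.lower buf) (PySem.Str.lower tag)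
        if idx ≠ -1 ∧ (b.1 = -1 ∨ idx < b.1) then (idx, PySem.Str.len tag) else b)
      (-1, 0)) = List.foldl pvG (-1, 0) cands := by
    have hfun : (fun (b : Int × Int) (tag : String) =>
        let idx := PySem.Str.find (PySem.Str.lower buf) (PySem.Str.lower tag)
        if idx ≠ -1 ∧ (b.1 = -1 ∨ idx < b.1) then (idx, PySem.Str.len tag) else b)
        = fun (b : Int × Int) (tag : String) =>
            pvG b (PySem.Chars.find bl (PySem.Str.lower tag).toList, PySem.Str.len tag) := by
      funext b tag
      simp [pvG, PySem.Str.find_eq, hbl]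
    rw [hfun, hcands, hpairs, List.map_map, List.foldl_map]
    rfl
  have hall : ∀ c ∈ cands, -1 ≤ c.1 := by
    intro c hc
    rw [hcands] at hc
    obtain ⟨q, _, rfl⟩ := List.mem_map.mp hc
    exact PySem.Chars.neg_one_le_find bl q.2
  -- Step 2: the fold equals pvSpecOf cands
  have hfold : List.foldl pvG (-1, 0) cands = pvSpecOf cands := by
    rw [pv_foldl_g cands (-1, 0) (by norm_num) hall]
    rcases pvSpecOf_cases cands with h | h
    · simp [h]
    · simp [h.2]
  -- Step 3: B's scan equals pvSpecOf cands
  have hscan : pvScan bl pairs (List.range (bl.length + 1)) = pvSpecOf cands := by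
    rcases pvSpecOf_cases cands with hcase | hcase
    · -- no tag occurs anywhere
      rw [hcase]
      apply pvScan_none
      intro i _
      rw [pvInner_none_iff]
      intro q hq
      by_contra hmatch
      have hsw : PySem.Chars.startswith (bl.drop i) q.2 = true := by
        cases hh : PySem.Chars.startswith (bl.drop i) q.2
        · exact absurd hh hmatch
        · rfl
      have hpre := (PySem.Chars.startswith_iff _ _).mp hsw
      have hfind := pv_match_find bl q.2 i hpre
      have hmem : (PySem.Chars.find bl q.2, PySem.Str.len q.1) ∈ cands := by
        rw [hcands]; exact List.mem_map.mpr ⟨q, hq, rfl⟩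
      have := pvSpecOf_min cands _ hmem (by simp; omega)
      rw [hcase] at this
      simp at this
    · -- some tag occurs; the scan stops exactly at the minimal find position
      obtain ⟨hmem, hne⟩ := hcase
      obtain ⟨l1, l2, heq, hbad⟩ := pvSpecOf_first cands hne
      rw [hcands] at heq
      obtain ⟨p1, rest, hp, hm1, hm2⟩ := List.map_eq_append_iff.mp heq
      obtain ⟨q, p2, hr, hq, hm3⟩ := List.map_eq_cons_iff.mp hm2
      have hfq0 : 0 ≤ PySem.Chars.find bl q.2 := by
        have h1 := hne
        rw [← hq] at h1
        simp only at h1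
        have h2 := PySem.Chars.neg_one_le_find bl q.2
        omega
      set m := (PySem.Chars.find bl q.2).toNat with hm
      have hmle : m ≤ bl.length := by
        have := PySem.Chars.find_le_length bl q.2
        omega
      obtain ⟨t, ht⟩ := pv_range_split m bl.length hmle
      rw [ht]
      have hq1 : (pvSpecOf cands).1 = PySem.Chars.find bl q.2 := by rw [← hq]
      -- positions before m have no match at all
      have hnone : ∀ j ∈ List.range m, pvInner bl j pairs = none := by
        intro j hj
        rw [List.mem_range] at hj
        rw [pvInner_none_iff]
        intro q' hq'
        by_contra hmatch
        have hsw : PySem.Chars.startswith (bl.drop j) q'.2 = true := by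
          cases hh : PySem.Chars.startswith (bl.drop j) q'.2
          · exact absurd hh hmatch
          · rfl
        have hpre := (PySem.Chars.startswith_iff _ _).mp hsw
        have hfind := pv_match_find bl q'.2 j hpre
        have hmem' : (PySem.Chars.find bl q'.2, PySem.Str.len q'.1) ∈ cands := by
          rw [hcands]; exact List.mem_map.mpr ⟨q', hq', rfl⟩
        have hmin := pvSpecOf_min cands _ hmem' (by simp; omega)
        rw [hq1] at hmin
        simp only at hmin
        omega
      -- at position m the first matching pair is q
      have hq_match : PySem.Chars.startswith (bl.drop m) q.2 = true := by
        rw [PySem.Chars.startswith_iff]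
        exact (PySem.Chars.find_spec hfq0).1
      have hl1_no : ∀ q' ∈ p1, PySem.Chars.startswith (bl.drop m) q'.2 = false := by
        intro q' hq'
        by_contra hmatch
        have hsw : PySem.Chars.startswith (bl.drop m) q'.2 = true := by
          cases hh : PySem.Chars.startswith (bl.drop m) q'.2
          · exact absurd hh hmatch
          · rfl
        have hpre := (PySem.Chars.startswith_iff _ _).mp hsw
        have hfind := pv_match_find bl q'.2 m hpre
        have hin_l1 : (PySem.Chars.find bl q'.2, PySem.Str.len q'.1) ∈ l1 := by
          rw [← hm1]; exact List.mem_map.mpr ⟨q', hq', rfl⟩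
        have := hbad _ hin_l1
        rw [hq1] at this
        simp only [not_and, not_le] at this
        have hlt := this (by simp; omega)
        omega
      have hinner := pvInner_first bl m p1 p2 q hl1_no hq_match
      rw [hp, hr] at hnone ⊢
      rw [pvScan_split bl _ (List.range m) t m _ hnone hinner]
      rw [← hq]
      simp only [Prod.mk.injEq]
      constructor
      · omega
      · trivial
  rw [hA, hfold, ← hscan]
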